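-- pv_equiv track=rewrite | github.com/honeykjoule/adventofcode23 | day01/part2.py | calculate_sum_from_lines
-- ===== SOURCE A (Python) =====
-- MAP = {
--     'zero': '0',
--     'one': '1',
--     'two': '2',
--     'three': '3',
--     'four': '4',
--     'five': '5',
--     'six': '6',
--     'seven': '7',
--     'eight': '8',
--     'nine': '9'
-- }
--
-- def calculate_sum_from_lines(file):
--     total_sum = 0
--
--     for line in file:
--         first_digit = None
--         last_digit = None
--         first_digit_index = len(line)  # Initialize to max length
--         last_digit_index = -1         # Initialize to -1
--
--         # Find the first digit or number word
--         for i, char in enumerate(line):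
--             if char.isdigit() and first_digit_index == len(line):
--                 first_digit = char
--                 first_digit_index = i
--                 break
--
--         for i in range(len(line)):
--             for j in range(i + 1, len(line) + 1):
--                 if line[i:j] in MAP:
--                     if i < first_digit_index:
--                         first_digit_index = i
--                         first_digit = MAP[line[i:j]]
--                     break
--
--         # Find the last digit or number word
--         for i in range(len(line) - 1, -1, -1):
--             if line[i].isdigit() and last_digit_index == -1:
--                 last_digit_index = i
--                 last_digit = line[i]
--                 break
--
--         for i in range(len(line) - 1, -1, -1):
--             for j in range(i, -1, -1):
--                 if line[j:i + 1] in MAP: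
--                     if i > last_digit_index:
--                         last_digit_index = i
--                         last_digit = MAP[line[j:i + 1]]
--                         break
--
--         # Add to the total sum if both digits are found
--         if first_digit is not None and last_digit is not None:
--             total_sum += int(first_digit + last_digit)
--
--     return total_sum
-- ===== SOURCE B (Python) =====
-- MAP = {
--     'zero': '0',
--     'one': '1',
--     'two': '2',
--     'three': '3',
--     'four': '4',
--     'five': '5',
--     'six': '6',
--     'seven': '7',
--     'eight': '8',
--     'nine': '9'
-- }
--
-- def calculate_sum_from_lines(file):
--     # One collecting left-to-right pass per line: gather every digit token
--     # (a digit character, or the value of a spelled-out number word starting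
--     # there), then combine the first and last token.
--     total_sum = 0
--     for line in file:
--         digits = []
--         for i, ch in enumerate(line):
--             if ch.isdigit():
--                 digits.append(ch)
--             else:
--                 for word, val in MAP.items():
--                     if line.startswith(word, i):
--                         digits.append(val)
--                         break
--         if digits:
--             total_sum += int(digits[0] + digits[-1])
--     return total_sum
-- ===== Notes on version B (the rewrite author's own statement) =====
-- stated objective: simpler
-- what changed: A makes four directional scans per line (first-digit, first-word via all substrings line[i:j], last-digit, last-word via all substrings line[j:i+1]) with index bookkeeping; B makes one left-to-right collecting pass that appends every digit token (digit char or number word recognised by startswith at that position) and combines the first and last collected token.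
import Mathlib
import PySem

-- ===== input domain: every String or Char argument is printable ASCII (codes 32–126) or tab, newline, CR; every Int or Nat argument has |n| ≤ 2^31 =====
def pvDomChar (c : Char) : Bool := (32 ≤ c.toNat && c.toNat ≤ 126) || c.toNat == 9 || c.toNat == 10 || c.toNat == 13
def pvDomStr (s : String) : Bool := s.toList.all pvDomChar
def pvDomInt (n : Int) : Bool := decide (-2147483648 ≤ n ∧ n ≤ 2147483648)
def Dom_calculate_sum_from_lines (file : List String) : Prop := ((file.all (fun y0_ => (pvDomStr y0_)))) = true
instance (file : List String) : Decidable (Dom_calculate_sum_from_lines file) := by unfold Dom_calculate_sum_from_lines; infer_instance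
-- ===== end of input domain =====

-- B replaces A's four directional scans per line by ONE left-to-right pass that collects
-- every digit token (digit character or spelled-out number word) and combines the first
-- and last collected token (objective: simpler).

-- ===== PORT A =====

-- the module-level MAP dict: keys/values as character lists
def pvMAP : List (List Char × List Char) :=
  [(['z','e','r','o'], ['0']), (['o','n','e'], ['1']), (['t','w','o'], ['2']),
   (['t','h','r','e','e'], ['3']), (['f','o','u','r'], ['4']), (['f','i','v','e'], ['5']),
   (['s','i','x'], ['6']), (['s','e','v','e','n'], ['7']), (['e','i','g','h','t'], ['8']),
   (['n','i','n','e'], ['9'])]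

-- `sub in MAP` / `MAP[sub]` (keys are distinct, so first-match lookup = dict lookup)
def pvLookup (sub : List Char) : Option (List Char) :=
  (pvMAP.find? (fun wv => wv.1 == sub)).map (·.2)

-- first loop: `for i, char in enumerate(line): if char.isdigit() and first_digit_index == len(line): …; break`
def pvA1 (n : Int) : List (Int × Char) → (Option (List Char) × Int) → (Option (List Char) × Int)
  | [], st => st
  | (i, ch) :: rest, (fd, fdi) =>
    if PySem.Chars.isdigit ch && (fdi == n) then (some [ch], i)
    else pvA1 n rest (fd, fdi)

-- second loop, inner: `for j in range(i+1, len(line)+1): if line[i:j] in MAP: (if i < fdi: update); break`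
def pvA2inner (cs : List Char) (i : Int) :
    List Int → (Option (List Char) × Int) → (Option (List Char) × Int)
  | [], st => st
  | j :: js, (fd, fdi) =>
    match pvLookup (PySem.List.slice cs (some i) (some j)) with
    | some v => if i < fdi then (some v, i) else (fd, fdi)
    | none => pvA2inner cs i js (fd, fdi)

-- second loop, outer: `for i in range(len(line)): …`
def pvA2 (cs : List Char) (n : Int) :
    List Int → (Option (List Char) × Int) → (Option (List Char) × Int)
  | [], st => st
  | i :: is, st => pvA2 cs n is (pvA2inner cs i (PySem.List.pyRange (i + 1) (n + 1) 1) st)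

-- third loop: `for i in range(len(line)-1, -1, -1): if line[i].isdigit() and ldi == -1: …; break`
def pvA3 (cs : List Char) : List Int → (Option (List Char) × Int) → (Option (List Char) × Int)
  | [], st => st
  | i :: is, (ld, ldi) =>
    if PySem.Chars.isdigit (PySem.List.pyGetD cs i ' ') && (ldi == (-1 : Int)) then
      (some [PySem.List.pyGetD cs i ' '], i)
    else pvA3 cs is (ld, ldi)

-- fourth loop, inner: `for j in range(i, -1, -1): if line[j:i+1] in MAP: if i > ldi: update; break`
-- (the break sits INSIDE `if i > ldi`, so on a match without update the scan continues)
def pvA4inner (cs : List Char) (i : Int) :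
    List Int → (Option (List Char) × Int) → (Option (List Char) × Int)
  | [], st => st
  | j :: js, (ld, ldi) =>
    match pvLookup (PySem.List.slice cs (some j) (some (i + 1))) with
    | some v => if ldi < i then (some v, i) else pvA4inner cs i js (ld, ldi)
    | none => pvA4inner cs i js (ld, ldi)

-- fourth loop, outer
def pvA4 (cs : List Char) : List Int → (Option (List Char) × Int) → (Option (List Char) × Int)
  | [], st => st
  | i :: is, st => pvA4 cs is (pvA4inner cs i (PySem.List.pyRange i (-1) (-1)) st)

-- one iteration of A's `for line in file` body: the value added to total_sum
def pvALine (line : String) : Int :=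
  let cs := line.toList
  let n : Int := PySem.List.len cs
  let st2 := pvA2 cs n (PySem.List.pyRange 0 n 1)
              (pvA1 n (PySem.List.enumerate cs 0) (none, n))
  let st4 := pvA4 cs (PySem.List.pyRange (n - 1) (-1) (-1))
              (pvA3 cs (PySem.List.pyRange (n - 1) (-1) (-1)) (none, -1))
  match st2.1, st4.1 with
  | some fd, some ld => (PySem.Int.ofChars? (fd ++ ld)).getD 0  -- int(first+last); always two digit chars
  | _, _ => 0

def calculate_sum_from_lines (file : List String) : Int :=
  file.foldl (fun acc line => acc + pvALine line) 0

-- ===== PORT B =====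

-- `for word, val in MAP.items(): if line.startswith(word, i): … break`
def pvBWordAt (cs : List Char) (i : Nat) : Option (List Char) :=
  (pvMAP.find? (fun wv => PySem.Chars.startswith (cs.drop i) wv.1)).map (·.2)

-- one iteration of B's `for line in file` body
def pvBLine (line : String) : Int :=
  let cs := line.toList
  let digits := (PySem.List.enumerate cs 0).foldl
    (fun acc ich =>
      if PySem.Chars.isdigit ich.2 then acc ++ [[ich.2]]
      else
        match pvBWordAt cs ich.1.toNat with
        | some v => acc ++ [v]
        | none => acc)
    ([] : List (List Char))
  if digits.isEmpty then 0
  else (PySem.Int.ofChars? (PySem.List.pyGetD digits 0 [] ++ PySem.List.pyGetD digits (-1) [])).getD 0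

def calculate_sum_from_lines_alt (file : List String) : Int :=
  file.foldl (fun acc line => acc + pvBLine line) 0

-- ===== PRECONDITION & SPEC =====
def Spec_calculate_sum_from_lines (file : List String) (out : Int) : Prop := out = calculate_sum_from_lines_alt file
instance (file : List String) (out : Int) : Decidable (Spec_calculate_sum_from_lines file out) := by unfold Spec_calculate_sum_from_lines; infer_instance

-- ===== CLAIM (what is proved, stated in full; the proofs are below) =====
def Claim_equal_calculate_sum_from_lines : Prop := ∀ (file : List String), Dom_calculate_sum_from_lines file → Spec_calculate_sum_from_lines file (calculate_sum_from_lines file)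

-- ===== LEMMAS AND PROOFS =====

-- the per-position token: digit character, else the number word starting here (if any)
def dTok (cs : List Char) (i : Int) : Option (List Char) :=
  if PySem.Chars.isdigit (PySem.List.pyGetD cs i ' ') then some [PySem.List.pyGetD cs i ' ']
  else pvBWordAt cs i.toNat

-- digit-only token
def gTok (cs : List Char) (i : Int) : Option (List Char) :=
  if PySem.Chars.isdigit (PySem.List.pyGetD cs i ' ') then some [PySem.List.pyGetD cs i ' ']
  else none

-- word-by-start token
def wTok (cs : List Char) (i : Int) : Option (List Char) := pvBWordAt cs i.toNat

-- word-by-end token: the number word ENDING at index i (A's fourth scan finds these)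
def eTok (cs : List Char) (i : Int) : Option (List Char) :=
  (pvMAP.find? (fun wv => decide (wv.1 <:+ cs.take (i + 1).toNat))).map (·.2)

-- first index in the list whose token is present, with its token
def firstHit (g : Int → Option (List Char)) : List Int → Option (List Char × Int)
  | [] => none
  | i :: is => match g i with
    | some v => some (v, i)
    | none => firstHit g is

-- ---- facts about the literal MAP (all by decide) ----
lemma map_key_unique : ∀ p ∈ pvMAP, ∀ q ∈ pvMAP, p.1 = q.1 → p = q := by decide
lemma map_key_infix_bool :
    (pvMAP.all (fun p => pvMAP.all (fun q => !(PySem.Chars.isIn p.1 q.1) || (p == q)))) = true := by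
  decide

lemma map_key_infix : ∀ p ∈ pvMAP, ∀ q ∈ pvMAP, p.1 <:+: q.1 → p = q := by
  intro p hp q hq h
  have h2 := List.all_eq_true.1 (List.all_eq_true.1 map_key_infix_bool p hp) q hq
  rw [← PySem.Chars.isIn_iff_infix] at h
  simp [h] at h2
  exact h2
lemma map_key_ne_nil : ∀ p ∈ pvMAP, p.1 ≠ [] := by decide
lemma map_key_not_digit_bool :
    (pvMAP.all (fun p => p.1.all (fun c => !PySem.Chars.isdigit c))) = true := by decide

lemma map_key_not_digit : ∀ p ∈ pvMAP, ∀ c ∈ p.1, PySem.Chars.isdigit c = false := by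
  intro p hp c hc
  have h2 := List.all_eq_true.1 (List.all_eq_true.1 map_key_not_digit_bool p hp) c hc
  simpa using h2

-- find? returns the unique satisfying element
lemma find?_eq_some_of_unique {α : Type} {p : α → Bool} {l : List α} {a : α}
    (ha : a ∈ l) (hpa : p a = true) (huniq : ∀ b ∈ l, p b = true → b = a) :
    l.find? p = some a := by
  induction l with
  | nil => cases ha
  | cons b bs ih =>
    by_cases hb : p b = true
    · have hba : b = a := huniq b (List.mem_cons_self) hb
      subst hba
      exact List.find?_cons_of_pos hb
    · have hba : a ∈ bs := by
        rcases List.mem_cons.1 ha with h | h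
        · exact absurd (h ▸ hpa) hb
        · exact h
      rw [List.find?_cons_of_neg (by simpa using hb)]
      exact ih hba (fun c hc hpc => huniq c (List.mem_cons_of_mem _ hc) hpc)

-- ---- pvLookup semantics ----
lemma pvLookup_some_mem {sub v} (h : pvLookup sub = some v) : (sub, v) ∈ pvMAP := by
  unfold pvLookup at h
  rcases Option.map_eq_some_iff.1 h with ⟨⟨w, v'⟩, hf, hv⟩
  have hm := List.mem_of_find?_eq_some hf
  have hp := List.find?_some hf
  simp at hp hv
  subst hp; subst hv; exact hm

lemma pvLookup_eq_some_of_mem {w v} (h : (w, v) ∈ pvMAP) : pvLookup w = some v := by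
  unfold pvLookup
  rw [find?_eq_some_of_unique h (by simp)
    (fun b hb hpb => map_key_unique b hb (w, v) h (by simpa using hpb))]
  rfl

-- ---- wTok semantics ----
lemma wTok_eq_some_iff {cs : List Char} {i : Int} {v} :
    wTok cs i = some v ↔ ∃ w, (w, v) ∈ pvMAP ∧ w <+: cs.drop i.toNat := by
  constructor
  · intro h
    unfold wTok pvBWordAt at h
    rcases Option.map_eq_some_iff.1 h with ⟨⟨w, v'⟩, hf, hv⟩
    have hm := List.mem_of_find?_eq_some hf
    have hp := List.find?_some hf
    simp only at hv; subst hv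
    exact ⟨w, hm, (PySem.Chars.startswith_iff _ _).1 hp⟩
  · rintro ⟨w, hm, hpre⟩
    unfold wTok pvBWordAt
    rw [find?_eq_some_of_unique hm (by simpa using (PySem.Chars.startswith_iff _ _).2 hpre)
      (fun q hq hpq => ?_)]
    · rfl
    · have hq' : q.1 <+: cs.drop i.toNat := (PySem.Chars.startswith_iff _ _).1 hpq
      rcases List.prefix_or_prefix_of_prefix hq' hpre with h | h
      · exact map_key_infix q hq (w, v) hm h.isInfix
      · exact (map_key_infix (w, v) hm q hq h.isInfix).symm

lemma wTok_eq_none_iff {cs : List Char} {i : Int} :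
    wTok cs i = none ↔ ∀ p ∈ pvMAP, ¬ p.1 <+: cs.drop i.toNat := by
  unfold wTok pvBWordAt
  simp [List.find?_eq_none, PySem.Chars.startswith_iff]

-- ---- eTok semantics ----
lemma eTok_eq_some_iff {cs : List Char} {i : Int} {v} :
    eTok cs i = some v ↔ ∃ w, (w, v) ∈ pvMAP ∧ w <:+ cs.take (i + 1).toNat := by
  constructor
  · intro h
    unfold eTok at h
    rcases Option.map_eq_some_iff.1 h with ⟨⟨w, v'⟩, hf, hv⟩
    have hm := List.mem_of_find?_eq_some hf
    have hp := List.find?_some hf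
    simp only at hv; subst hv
    exact ⟨w, hm, by simpa using hp⟩
  · rintro ⟨w, hm, hsuf⟩
    unfold eTok
    rw [find?_eq_some_of_unique hm (by simpa using hsuf) (fun q hq hpq => ?_)]
    · rfl
    · have hq' : q.1 <:+ cs.take (i + 1).toNat := by simpa using hpq
      rcases List.suffix_or_suffix_of_suffix hq' hsuf with h | h
      · exact map_key_infix q hq (w, v) hm h.isInfix
      · exact (map_key_infix (w, v) hm q hq h.isInfix).symm

lemma eTok_eq_none_iff {cs : List Char} {i : Int} :
    eTok cs i = none ↔ ∀ p ∈ pvMAP, ¬ p.1 <:+ cs.take (i + 1).toNat := by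
  unfold eTok
  simp [List.find?_eq_none]

-- ---- slice shapes ----
lemma slice_eq_take_drop {cs : List Char} {i j : Int} (hi : 0 ≤ i) (hj : 0 ≤ j) :
    PySem.List.slice cs (some i) (some j) = (cs.drop i.toNat).take (j.toNat - i.toNat) :=
  PySem.List.slice_toNat cs hi hj

lemma slice_eq_drop_take {cs : List Char} {j i : Int} (hj : 0 ≤ j) (hi : 0 ≤ i + 1) :
    PySem.List.slice cs (some j) (some (i + 1)) = (cs.take (i + 1).toNat).drop j.toNat := by
  rw [slice_eq_take_drop hj hi, List.drop_take]

-- ---- firstHit basics ----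
lemma firstHit_mem {g : Int → Option (List Char)} :
    ∀ {l : List Int} {v : List Char} {i : Int}, firstHit g l = some (v, i) → i ∈ l ∧ g i = some v := by
  intro l
  induction l with
  | nil => intro v i h; cases h
  | cons a as ih =>
    intro v i h
    cases hg : g a with
    | some w => rw [firstHit, hg] at h; cases h; exact ⟨List.mem_cons_self, hg⟩
    | none =>
      rw [firstHit, hg] at h
      obtain ⟨hm, hgi⟩ := ih h
      exact ⟨List.mem_cons_of_mem _ hm, hgi⟩

-- ---- state shapes produced by the scans ----
def stOf (dflt : Int) : Option (List Char × Int) → Option (List Char) × Int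
  | none => (none, dflt)
  | some (v, i) => (some v, i)

def upd1 (st : Option (List Char) × Int) : Option (List Char × Int) → Option (List Char) × Int
  | none => st
  | some (v, i) => if i < st.2 then (some v, i) else st

def upd4 (st : Option (List Char) × Int) : Option (List Char × Int) → Option (List Char) × Int
  | none => st
  | some (v, i) => if st.2 < i then (some v, i) else st

-- ---- second loop, inner ----
lemma pvA2inner_no_match {cs : List Char} {i : Int} :
    ∀ {js : List Int}, (∀ j ∈ js, pvLookup (PySem.List.slice cs (some i) (some j)) = none) →
      ∀ st, pvA2inner cs i js st = st := by
  intro js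
  induction js with
  | nil => intro _ st; rfl
  | cons j js ih =>
    intro h st
    obtain ⟨fd, fdi⟩ := st
    rw [pvA2inner, h j List.mem_cons_self]
    exact ih (fun j' hj' => h j' (List.mem_cons_of_mem _ hj')) _

lemma pvA2inner_of_none {cs : List Char} {i : Int} (hi : 0 ≤ i) (hw : wTok cs i = none)
    {js : List Int} (hjs : ∀ j ∈ js, 0 ≤ j) (st : Option (List Char) × Int) :
    pvA2inner cs i js st = st := by
  apply pvA2inner_no_match (fun j hj => ?_)
  cases hcase : pvLookup (PySem.List.slice cs (some i) (some j)) with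
  | none => rfl
  | some v =>
    exfalso
    have hmem := pvLookup_some_mem hcase
    have hpre : PySem.List.slice cs (some i) (some j) <+: cs.drop i.toNat := by
      rw [slice_eq_take_drop hi (hjs j hj)]; exact List.take_prefix _ _
    exact (wTok_eq_none_iff.1 hw) _ hmem hpre

lemma pvA2inner_of_some {cs : List Char} {i : Int} {v : List Char}
    (hi : 0 ≤ i) (hw : wTok cs i = some v)
    (st : Option (List Char) × Int) :
    pvA2inner cs i (PySem.List.pyRange (i + 1) ((cs.length : Int) + 1) 1) st =
      if i < st.2 then (some v, i) else st := by
  obtain ⟨w, hmem, hpre⟩ := wTok_eq_some_iff.1 hw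
  have hwlen : w.length ≤ cs.length - i.toNat := by
    have := hpre.length_le; simpa using this
  have hne : w ≠ [] := map_key_ne_nil _ hmem
  have hwpos : 0 < w.length := List.length_pos_of_ne_nil hne
  have key_eq : ∀ {u : List Char} {v' : List Char}, (u, v') ∈ pvMAP → u <+: cs.drop i.toNat → u = w := by
    intro u v' hm hp
    rcases List.prefix_or_prefix_of_prefix hp hpre with h | h
    · exact congrArg Prod.fst (map_key_infix _ hm _ hmem h.isInfix)
    · exact (congrArg Prod.fst (map_key_infix _ hmem _ hm h.isInfix)).symm
  have aux : ∀ (k : Nat) (j : Int), i < j → j = i + w.length - k →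
      pvA2inner cs i (PySem.List.pyRange j ((cs.length : Int) + 1) 1) st =
        if i < st.2 then (some v, i) else st := by
    intro k
    induction k with
    | zero =>
      intro j hij hj
      rw [PySem.List.pyRange_one_cons (by omega)]
      obtain ⟨fd, fdi⟩ := st
      have hslice : PySem.List.slice cs (some i) (some j) = w := by
        rw [slice_eq_take_drop hi (by omega)]
        have hlen : j.toNat - i.toNat = w.length := by omega
        rw [hlen]
        exact (List.prefix_iff_eq_take.1 hpre).symm
      rw [pvA2inner, hslice, pvLookup_eq_some_of_mem hmem]
    | succ k ih =>
      intro j hij hj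
      rw [PySem.List.pyRange_one_cons (by omega)]
      obtain ⟨fd, fdi⟩ := st
      have hnone : pvLookup (PySem.List.slice cs (some i) (some j)) = none := by
        cases hcase : pvLookup (PySem.List.slice cs (some i) (some j)) with
        | none => rfl
        | some v' =>
          exfalso
          have hm' := pvLookup_some_mem hcase
          have hp' : PySem.List.slice cs (some i) (some j) <+: cs.drop i.toNat := by
            rw [slice_eq_take_drop hi (by omega)]; exact List.take_prefix _ _
          have heq := key_eq hm' hp'
          have hle : (PySem.List.slice cs (some i) (some j)).length ≤ j.toNat - i.toNat := by
            rw [slice_eq_take_drop hi (by omega)]; exact List.length_take_le _ _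
          rw [heq] at hle
          omega
      rw [pvA2inner, hnone]
      exact ih (j + 1) (by omega) (by omega)
  exact aux (w.length - 1) (i + 1) (by omega) (by omega)

-- ---- second loop, outer ----
lemma pvA2_eq {cs : List Char} : ∀ (k : Nat) (a : Int) (st : Option (List Char) × Int),
    0 ≤ a → ((cs.length : Int) - a).toNat ≤ k →
    pvA2 cs (cs.length : Int) (PySem.List.pyRange a (cs.length : Int) 1) st =
      upd1 st (firstHit (wTok cs) (PySem.List.pyRange a (cs.length : Int) 1)) := by
  intro k
  induction k with
  | zero =>
    intro a st ha hk
    rw [PySem.List.pyRange_one_eq_nil (by omega)]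
    rfl
  | succ k ih =>
    intro a st ha hk
    by_cases hna : (cs.length : Int) ≤ a
    · rw [PySem.List.pyRange_one_eq_nil hna]; rfl
    · rw [PySem.List.pyRange_one_cons (by omega), pvA2]
      cases hw : wTok cs a with
      | none =>
        rw [pvA2inner_of_none ha hw
          (fun j hj => by have := (PySem.List.mem_pyRange_one.1 hj).1; omega) st]
        rw [ih (a + 1) st (by omega) (by omega)]
        rw [firstHit, hw]
      | some v =>
        rw [pvA2inner_of_some ha hw st]
        rw [ih (a + 1) _ (by omega) (by omega)]
        rw [firstHit, hw]
        cases hfh : firstHit (wTok cs) (PySem.List.pyRange (a + 1) (cs.length : Int) 1) with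
        | none => simp [upd1]
        | some vi =>
          obtain ⟨v', i'⟩ := vi
          have hi' : a + 1 ≤ i' := by
            have := (PySem.List.mem_pyRange_one.1 (firstHit_mem hfh).1).1; omega
          simp only [upd1]
          by_cases hlt : a < st.2
          · rw [if_pos hlt]
            split_ifs with h2
            · omega
            · rfl
          · rw [if_neg hlt, if_neg (by omega)]

-- ---- first loop ----
lemma pvA1_eq {cs : List Char} : ∀ (k : Nat) (a : Int), 0 ≤ a → ((cs.length : Int) - a).toNat ≤ k →
    pvA1 (cs.length : Int)
        ((PySem.List.pyRange a (cs.length : Int) 1).map (fun j => (j, PySem.List.pyGetD cs j ' ')))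
        (none, (cs.length : Int)) =
      stOf (cs.length : Int) (firstHit (gTok cs) (PySem.List.pyRange a (cs.length : Int) 1)) := by
  intro k
  induction k with
  | zero =>
    intro a ha hk
    rw [PySem.List.pyRange_one_eq_nil (by omega)]
    rfl
  | succ k ih =>
    intro a ha hk
    by_cases hna : (cs.length : Int) ≤ a
    · rw [PySem.List.pyRange_one_eq_nil hna]; rfl
    · rw [PySem.List.pyRange_one_cons (by omega), List.map_cons, pvA1, firstHit]
      cases hd : PySem.Chars.isdigit (PySem.List.pyGetD cs a ' ') with
      | true =>
        rw [gTok, hd]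
        simp [stOf]
      | false =>
        rw [gTok, hd, if_neg (by simp)]
        exact ih (a + 1) (by omega) (by omega)

-- ---- third loop ----
lemma pvA3_eq {cs : List Char} : ∀ (k : Nat) (a : Int), (a + 1).toNat ≤ k →
    pvA3 cs (PySem.List.pyRange a (-1) (-1)) (none, -1) =
      stOf (-1) (firstHit (gTok cs) (PySem.List.pyRange a (-1) (-1))) := by
  intro k
  induction k with
  | zero =>
    intro a hk
    rw [PySem.List.pyRange_neg_one_eq_nil (by omega)]
    rfl
  | succ k ih =>
    intro a hk
    by_cases hna : a ≤ -1
    · rw [PySem.List.pyRange_neg_one_eq_nil hna]; rfl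
    · rw [PySem.List.pyRange_neg_one_cons (by omega), pvA3, firstHit]
      cases hd : PySem.Chars.isdigit (PySem.List.pyGetD cs a ' ') with
      | true =>
        rw [gTok, hd]
        simp [stOf]
      | false =>
        rw [gTok, hd, if_neg (by simp)]
        exact ih (a - 1) (by omega)

-- ---- fourth loop, inner ----
lemma pvA4inner_no_match {cs : List Char} {i : Int} :
    ∀ {js : List Int}, (∀ j ∈ js, pvLookup (PySem.List.slice cs (some j) (some (i + 1))) = none) →
      ∀ st, pvA4inner cs i js st = st := by
  intro js
  induction js with
  | nil => intro _ st; rfl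
  | cons j js ih =>
    intro h st
    obtain ⟨ld, ldi⟩ := st
    rw [pvA4inner, h j List.mem_cons_self]
    exact ih (fun j' hj' => h j' (List.mem_cons_of_mem _ hj')) _

lemma pvA4inner_of_none {cs : List Char} {i : Int} (hi : 0 ≤ i) (he : eTok cs i = none)
    {js : List Int} (hjs : ∀ j ∈ js, 0 ≤ j) (st : Option (List Char) × Int) :
    pvA4inner cs i js st = st := by
  apply pvA4inner_no_match (fun j hj => ?_)
  cases hcase : pvLookup (PySem.List.slice cs (some j) (some (i + 1))) with
  | none => rfl
  | some v =>
    exfalso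
    have hmem := pvLookup_some_mem hcase
    have hsuf : PySem.List.slice cs (some j) (some (i + 1)) <:+ cs.take (i + 1).toNat := by
      rw [slice_eq_drop_take (hjs j hj) (by omega)]; exact List.drop_suffix _ _
    exact (eTok_eq_none_iff.1 he) _ hmem hsuf

lemma pvA4inner_of_some {cs : List Char} {i : Int} {v : List Char}
    (hi : 0 ≤ i) (hin : i < (cs.length : Int)) (he : eTok cs i = some v)
    (st : Option (List Char) × Int) :
    pvA4inner cs i (PySem.List.pyRange i (-1) (-1)) st =
      if st.2 < i then (some v, i) else st := by
  obtain ⟨w, hmem, hsuf⟩ := eTok_eq_some_iff.1 he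
  have hprelen : (cs.take (i + 1).toNat).length = (i + 1).toNat := by
    rw [List.length_take]; omega
  have hwlen : w.length ≤ (i + 1).toNat := by
    have := hsuf.length_le; omega
  have hne : w ≠ [] := map_key_ne_nil _ hmem
  have hwpos : 0 < w.length := List.length_pos_of_ne_nil hne
  have key_eq : ∀ {u : List Char} {v' : List Char}, (u, v') ∈ pvMAP →
      u <:+ cs.take (i + 1).toNat → u = w := by
    intro u v' hm hp
    rcases List.suffix_or_suffix_of_suffix hp hsuf with h | h
    · exact congrArg Prod.fst (map_key_infix _ hm _ hmem h.isInfix)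
    · exact (congrArg Prod.fst (map_key_infix _ hmem _ hm h.isInfix)).symm
  -- a slice that is strictly shorter or longer than w is no key
  have hnomatch : ∀ (j : Int), 0 ≤ j → j ≤ i → j ≠ i + 1 - w.length →
      pvLookup (PySem.List.slice cs (some j) (some (i + 1))) = none := by
    intro j hj hji hjne
    cases hcase : pvLookup (PySem.List.slice cs (some j) (some (i + 1))) with
    | none => rfl
    | some v' =>
      exfalso
      have hm' := pvLookup_some_mem hcase
      have hp' : PySem.List.slice cs (some j) (some (i + 1)) <:+ cs.take (i + 1).toNat := by
        rw [slice_eq_drop_take hj (by omega)]; exact List.drop_suffix _ _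
      have heq := key_eq hm' hp'
      have hlen : (PySem.List.slice cs (some j) (some (i + 1))).length = (i + 1).toNat - j.toNat := by
        rw [slice_eq_drop_take hj (by omega), List.length_drop, hprelen]
      rw [heq] at hlen
      omega
  have hw_at : PySem.List.slice cs (some (i + 1 - w.length)) (some (i + 1)) = w := by
    rw [slice_eq_drop_take (by omega) (by omega)]
    have : (i + 1 - (w.length : Int)).toNat = (cs.take (i + 1).toNat).length - w.length := by omega
    rw [this]
    exact (List.suffix_iff_eq_drop.1 hsuf).symm
  have tail_none : ∀ st', pvA4inner cs i (PySem.List.pyRange (i - w.length) (-1) (-1)) st' = st' := by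
    intro st'
    apply pvA4inner_no_match (fun j hj => ?_)
    have hmem' := PySem.List.mem_pyRange_neg_one.1 hj
    exact hnomatch j (by omega) (by omega) (by omega)
  have aux : ∀ (k : Nat) (j : Int), i + 1 - w.length ≤ j → j ≤ i → (j - (i + 1 - w.length)).toNat ≤ k →
      pvA4inner cs i (PySem.List.pyRange j (-1) (-1)) st =
        if st.2 < i then (some v, i) else st := by
    intro k
    induction k with
    | zero =>
      intro j hj0 hji hk
      have hj : j = i + 1 - w.length := by omega
      subst hj
      rw [PySem.List.pyRange_neg_one_cons (by omega)]
      obtain ⟨ld, ldi⟩ := st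
      rw [pvA4inner, hw_at, pvLookup_eq_some_of_mem hmem]
      by_cases hlt : ldi < i
      · simp only [if_pos hlt]
      · simp only [if_neg hlt]
        have heq1 : i + 1 - (w.length : Int) - 1 = i - w.length := by omega
        rw [heq1]
        exact tail_none _
    | succ k ih =>
      intro j hj0 hji hk
      by_cases hj : j = i + 1 - w.length
      · subst hj
        rw [PySem.List.pyRange_neg_one_cons (by omega)]
        obtain ⟨ld, ldi⟩ := st
        rw [pvA4inner, hw_at, pvLookup_eq_some_of_mem hmem]
        by_cases hlt : ldi < i
        · simp only [if_pos hlt]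
        · simp only [if_neg hlt]
          have heq1 : i + 1 - (w.length : Int) - 1 = i - w.length := by omega
          rw [heq1]
          exact tail_none _
      · rw [PySem.List.pyRange_neg_one_cons (by omega)]
        obtain ⟨ld, ldi⟩ := st
        rw [pvA4inner, hnomatch j (by omega) hji hj]
        exact ih (j - 1) (by omega) (by omega) (by omega)
  exact aux w.length i (by omega) (by omega) (by omega)

-- ---- fourth loop, outer ----
lemma pvA4_eq {cs : List Char} : ∀ (k : Nat) (a : Int) (st : Option (List Char) × Int),
    a < (cs.length : Int) → (a + 1).toNat ≤ k →
    pvA4 cs (PySem.List.pyRange a (-1) (-1)) st =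
      upd4 st (firstHit (eTok cs) (PySem.List.pyRange a (-1) (-1))) := by
  intro k
  induction k with
  | zero =>
    intro a st ha hk
    rw [PySem.List.pyRange_neg_one_eq_nil (by omega)]
    rfl
  | succ k ih =>
    intro a st ha hk
    by_cases hna : a ≤ -1
    · rw [PySem.List.pyRange_neg_one_eq_nil hna]; rfl
    · rw [PySem.List.pyRange_neg_one_cons (by omega), pvA4]
      cases hw : eTok cs a with
      | none =>
        rw [pvA4inner_of_none (by omega) hw
          (fun j hj => by have := (PySem.List.mem_pyRange_neg_one.1 hj).1; omega) st]
        rw [ih (a - 1) st (by omega) (by omega)]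
        rw [firstHit, hw]
      | some v =>
        rw [pvA4inner_of_some (by omega) ha hw st]
        rw [ih (a - 1) _ (by omega) (by omega)]
        rw [firstHit, hw]
        cases hfh : firstHit (eTok cs) (PySem.List.pyRange (a - 1) (-1) (-1)) with
        | none => simp [upd4]
        | some vi =>
          obtain ⟨v', i'⟩ := vi
          have hi' : i' ≤ a - 1 := by
            have := (PySem.List.mem_pyRange_neg_one.1 (firstHit_mem hfh).1).2; omega
          simp only [upd4]
          by_cases hlt : st.2 < a
          · rw [if_pos hlt]
            split_ifs with h2
            · omega
            · rfl
          · rw [if_neg hlt, if_neg (by omega)]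

-- ---- descending firstHit: a maximality characterisation ----
lemma firstHit_desc_none {g : Int → Option (List Char)} :
    ∀ (k : Nat) (a : Int), (a + 1).toNat ≤ k →
      firstHit g (PySem.List.pyRange a (-1) (-1)) = none →
      ∀ i, 0 ≤ i → i ≤ a → g i = none := by
  intro k
  induction k with
  | zero => intro a hk h i hi hia; exact absurd hia (by omega)
  | succ k ih =>
    intro a hk h i hi hia
    rw [PySem.List.pyRange_neg_one_cons (by omega), firstHit] at h
    cases hg : g a with
    | some v => rw [hg] at h; cases h
    | none =>
      rw [hg] at h
      by_cases hia' : i = a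
      · subst hia'; exact hg
      · exact ih (a - 1) (by omega) h i hi (by omega)

lemma firstHit_desc_some {g : Int → Option (List Char)} :
    ∀ (k : Nat) (a : Int), (a + 1).toNat ≤ k →
      ∀ {v : List Char} {i : Int}, firstHit g (PySem.List.pyRange a (-1) (-1)) = some (v, i) →
      0 ≤ i ∧ i ≤ a ∧ g i = some v ∧ ∀ i', i < i' → i' ≤ a → g i' = none := by
  intro k
  induction k with
  | zero =>
    intro a hk v i h
    rw [PySem.List.pyRange_neg_one_eq_nil (by omega)] at h
    cases h
  | succ k ih =>
    intro a hk v i h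
    by_cases hna : a ≤ -1
    · rw [PySem.List.pyRange_neg_one_eq_nil hna] at h; cases h
    · rw [PySem.List.pyRange_neg_one_cons (by omega), firstHit] at h
      cases hg : g a with
      | some w =>
        rw [hg] at h
        cases h
        exact ⟨by omega, le_refl _, hg, fun i' h1 h2 => absurd h1 (by omega)⟩
      | none =>
        rw [hg] at h
        obtain ⟨h1, h2, h3, h4⟩ := ih (a - 1) (by omega) h
        refine ⟨h1, by omega, h3, fun i' hi1 hi2 => ?_⟩
        by_cases hi' : i' = a
        · subst hi'; exact hg
        · exact h4 i' hi1 (by omega)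

-- ---- a digit position carries no number word ----
lemma wTok_none_of_digit {cs : List Char} {i : Int} (hi : 0 ≤ i) (hin : i < (cs.length : Int))
    (hd : PySem.Chars.isdigit (PySem.List.pyGetD cs i ' ') = true) : wTok cs i = none := by
  rw [wTok_eq_none_iff]
  intro p hp hpre
  obtain ⟨c, cs', hc⟩ := List.exists_cons_of_ne_nil (map_key_ne_nil p hp)
  obtain ⟨t, ht⟩ := hpre
  have h1 : (cs.drop i.toNat).head? = cs[i.toNat]? := List.head?_drop
  rw [← ht, hc] at h1
  have hget : cs[i.toNat]? = some c := by simpa using h1.symm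
  have hlt : i.toNat < cs.length := by omega
  have hgd : PySem.List.pyGetD cs i ' ' = c := by
    rw [PySem.List.pyGetD_eq_getElem (xs := cs) (d := ' ') hi (by simpa using hin)]
    have := List.getElem?_eq_getElem (l := cs) hlt
    rw [hget] at this
    exact (Option.some_injective _ this).symm
  have hcd : PySem.Chars.isdigit c = false :=
    map_key_not_digit p hp c (by rw [hc]; exact List.mem_cons_self)
  rw [hgd, hcd] at hd
  cases hd

-- ---- occurrence transfer between start-index and end-index views ----
lemma wTok_of_occ {cs : List Char} {w v : List Char} (hm : (w, v) ∈ pvMAP) {s : Nat}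
    (hpre : w <+: cs.drop s) : wTok cs (s : Int) = some v :=
  wTok_eq_some_iff.2 ⟨w, hm, by simpa using hpre⟩

lemma eTok_of_occ {cs : List Char} {w v : List Char} (hm : (w, v) ∈ pvMAP) {s : Nat}
    (hpre : w <+: cs.drop s) : eTok cs ((s : Int) + w.length - 1) = some v := by
  apply eTok_eq_some_iff.2 ⟨w, hm, ?_⟩
  have hidx : ((s : Int) + w.length - 1 + 1).toNat = s + w.length := by omega
  rw [hidx, List.take_add, (List.prefix_iff_eq_take.1 hpre).symm]
  exact List.suffix_append _ _

lemma occ_of_eTok {cs : List Char} {e : Int} {v : List Char} (he : eTok cs e = some v)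
    (h0 : 0 ≤ e) (hn : e < (cs.length : Int)) :
    ∃ w, (w, v) ∈ pvMAP ∧ w.length ≤ (e + 1).toNat ∧
      w <+: cs.drop ((e + 1).toNat - w.length) := by
  obtain ⟨w, hm, hsuf⟩ := eTok_eq_some_iff.1 he
  have hprelen : (cs.take (e + 1).toNat).length = (e + 1).toNat := by
    rw [List.length_take]; omega
  have hwl : w.length ≤ (e + 1).toNat := by have := hsuf.length_le; omega
  refine ⟨w, hm, hwl, ?_⟩
  have hdrop := List.suffix_iff_eq_drop.1 hsuf
  rw [hprelen] at hdrop
  have hw : w = List.take w.length (List.drop ((e + 1).toNat - w.length) cs) := by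
    conv_lhs => rw [hdrop]
    rw [List.drop_take]
    congr 1
    omega
  exact List.prefix_iff_eq_take.2 hw

-- two nested occurrences carry the same word
lemma occ_infix {cs : List Char} {w1 w2 : List Char} {s1 s2 : Nat}
    (h1 : w1 <+: cs.drop s1) (h2 : w2 <+: cs.drop s2)
    (hs : s2 ≤ s1) (he : s1 + w1.length ≤ s2 + w2.length) : w1 <:+: w2 := by
  obtain ⟨r, hr⟩ := h2
  have hd : cs.drop s1 = w2.drop (s1 - s2) ++ r := by
    have hdd : cs.drop s1 = (cs.drop s2).drop (s1 - s2) := by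
      rw [List.drop_drop]; congr 1; omega
    rw [hdd, ← hr, List.drop_append_of_le_length (by omega)]
  have hw1 : w1 <+: w2.drop (s1 - s2) := by
    have h1' : w1 <+: w2.drop (s1 - s2) ++ r := hd ▸ h1
    exact List.prefix_of_prefix_length_le h1' (List.prefix_append _ _)
      (by rw [List.length_drop]; omega)
  obtain ⟨t, ht⟩ := hw1
  exact ⟨w2.take (s1 - s2), t, by rw [List.append_assoc, ht, List.take_append_drop]⟩

-- ---- fusing the digit scan with the word scan (ascending: A's first digit) ----
lemma first_combine {cs : List Char} : ∀ (k : Nat) (a : Int), 0 ≤ a → ((cs.length : Int) - a).toNat ≤ k →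
    (upd1 (stOf (cs.length : Int) (firstHit (gTok cs) (PySem.List.pyRange a (cs.length : Int) 1)))
        (firstHit (wTok cs) (PySem.List.pyRange a (cs.length : Int) 1))).1 =
      (firstHit (dTok cs) (PySem.List.pyRange a (cs.length : Int) 1)).map (·.1) := by
  intro k
  induction k with
  | zero => intro a ha hk; rw [PySem.List.pyRange_one_eq_nil (by omega)]; rfl
  | succ k ih =>
    intro a ha hk
    by_cases hna : (cs.length : Int) ≤ a
    · rw [PySem.List.pyRange_one_eq_nil hna]; rfl
    · rw [PySem.List.pyRange_one_cons (by omega)]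
      cases hdig : PySem.Chars.isdigit (PySem.List.pyGetD cs a ' ') with
      | true =>
        have hw : wTok cs a = none := wTok_none_of_digit ha (by omega) hdig
        have hg : gTok cs a = some [PySem.List.pyGetD cs a ' '] := by
          rw [gTok, if_pos hdig]
        have hdt : dTok cs a = some [PySem.List.pyGetD cs a ' '] := by
          rw [dTok, if_pos hdig]
        simp only [firstHit, hg, hdt, hw]
        cases hfh : firstHit (wTok cs) (PySem.List.pyRange (a + 1) (cs.length : Int) 1) with
        | none => simp [upd1, stOf]
        | some vi =>
          obtain ⟨v', i'⟩ := vi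
          have hi' : a + 1 ≤ i' := by
            have := (PySem.List.mem_pyRange_one.1 (firstHit_mem hfh).1).1; omega
          have hni : ¬ i' < a := by omega
          simp [upd1, stOf, hni]
      | false =>
        have hg : gTok cs a = none := by rw [gTok, if_neg (by simp [hdig])]
        cases hw : wTok cs a with
        | some v =>
          have hdt : dTok cs a = some v := by
            rw [dTok, if_neg (by simp [hdig])]; exact hw
          simp only [firstHit, hg, hw, hdt]
          cases hdh : firstHit (gTok cs) (PySem.List.pyRange (a + 1) (cs.length : Int) 1) with
          | none => simp [upd1, stOf, show a < (cs.length : Int) by omega]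
          | some di =>
            obtain ⟨dv, di'⟩ := di
            have hdi : a + 1 ≤ di' := by
              have := (PySem.List.mem_pyRange_one.1 (firstHit_mem hdh).1).1; omega
            simp [upd1, stOf, show a < di' by omega]
        | none =>
          have hdt : dTok cs a = none := by
            rw [dTok, if_neg (by simp [hdig])]; exact hw
          simp only [firstHit, hg, hw, hdt]
          exact ih (a + 1) (by omega) (by omega)

-- ---- fusing the digit scan with the word scan (descending, by start index) ----
lemma last_combine {cs : List Char} : ∀ (k : Nat) (a : Int), a < (cs.length : Int) → (a + 1).toNat ≤ k →
    (upd4 (stOf (-1) (firstHit (gTok cs) (PySem.List.pyRange a (-1) (-1))))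
        (firstHit (wTok cs) (PySem.List.pyRange a (-1) (-1)))).1 =
      (firstHit (dTok cs) (PySem.List.pyRange a (-1) (-1))).map (·.1) := by
  intro k
  induction k with
  | zero => intro a ha hk; rw [PySem.List.pyRange_neg_one_eq_nil (by omega)]; rfl
  | succ k ih =>
    intro a ha hk
    by_cases hna : a ≤ -1
    · rw [PySem.List.pyRange_neg_one_eq_nil hna]; rfl
    · rw [PySem.List.pyRange_neg_one_cons (by omega)]
      cases hdig : PySem.Chars.isdigit (PySem.List.pyGetD cs a ' ') with
      | true =>
        have hw : wTok cs a = none := wTok_none_of_digit (by omega) ha hdig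
        have hg : gTok cs a = some [PySem.List.pyGetD cs a ' '] := by
          rw [gTok, if_pos hdig]
        have hdt : dTok cs a = some [PySem.List.pyGetD cs a ' '] := by
          rw [dTok, if_pos hdig]
        simp only [firstHit, hg, hdt, hw]
        cases hfh : firstHit (wTok cs) (PySem.List.pyRange (a - 1) (-1) (-1)) with
        | none => simp [upd4, stOf]
        | some vi =>
          obtain ⟨v', i'⟩ := vi
          have hi' : i' ≤ a - 1 := by
            have := (PySem.List.mem_pyRange_neg_one.1 (firstHit_mem hfh).1).2; omega
          have hni : ¬ a < i' := by omega
          simp [upd4, stOf, hni]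
      | false =>
        have hg : gTok cs a = none := by rw [gTok, if_neg (by simp [hdig])]
        cases hw : wTok cs a with
        | some v =>
          have hdt : dTok cs a = some v := by
            rw [dTok, if_neg (by simp [hdig])]; exact hw
          simp only [firstHit, hg, hw, hdt]
          cases hdh : firstHit (gTok cs) (PySem.List.pyRange (a - 1) (-1) (-1)) with
          | none => simp [upd4, stOf, show (-1 : Int) < a by omega]
          | some di =>
            obtain ⟨dv, di'⟩ := di
            have hdi : di' ≤ a - 1 := by
              have := (PySem.List.mem_pyRange_neg_one.1 (firstHit_mem hdh).1).2; omega
            simp [upd4, stOf, show di' < a by omega]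
        | none =>
          have hdt : dTok cs a = none := by
            rw [dTok, if_neg (by simp [hdig])]; exact hw
          simp only [firstHit, hg, hw, hdt]
          exact ih (a - 1) (by omega) (by omega)

-- ---- a digit cannot sit inside a number-word occurrence ----
lemma not_digit_in_span {cs : List Char} {w v : List Char} (hm : (w, v) ∈ pvMAP) {s : Nat}
    (hpre : w <+: cs.drop s) {d : Nat} (h1 : s ≤ d) (h2 : d < s + w.length) (hd : d < cs.length) :
    PySem.Chars.isdigit (cs[d]) = false := by
  have hw : w = List.take w.length (List.drop s cs) := List.prefix_iff_eq_take.1 hpre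
  have hget : w[d - s]? = some cs[d] := by
    conv_lhs => rw [hw]
    rw [List.getElem?_take, if_pos (by omega), List.getElem?_drop]
    have hds : s + (d - s) = d := by omega
    rw [hds, List.getElem?_eq_getElem hd]
  exact map_key_not_digit _ hm _ (List.mem_of_getElem? hget)

-- ---- the bridge: A's last scan keys on the word's END index, B's on its START index ----
lemma last_bridge {cs : List Char} :
    (upd4 (stOf (-1) (firstHit (gTok cs) (PySem.List.pyRange ((cs.length : Int) - 1) (-1) (-1))))
        (firstHit (eTok cs) (PySem.List.pyRange ((cs.length : Int) - 1) (-1) (-1)))).1 =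
    (upd4 (stOf (-1) (firstHit (gTok cs) (PySem.List.pyRange ((cs.length : Int) - 1) (-1) (-1))))
        (firstHit (wTok cs) (PySem.List.pyRange ((cs.length : Int) - 1) (-1) (-1)))).1 := by
  have hk : (((cs.length : Int) - 1) + 1).toNat ≤ cs.length := by omega
  cases hE : firstHit (eTok cs) (PySem.List.pyRange ((cs.length : Int) - 1) (-1) (-1)) with
  | none =>
    cases hW : firstHit (wTok cs) (PySem.List.pyRange ((cs.length : Int) - 1) (-1) (-1)) with
    | none => rfl
    | some vs_pair =>
      obtain ⟨v, s⟩ := vs_pair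
      exfalso
      obtain ⟨hs0, hsa, hws, -⟩ := firstHit_desc_some cs.length _ hk hW
      obtain ⟨w, hm, hpre⟩ := wTok_eq_some_iff.1 hws
      have hwl : w.length ≤ cs.length - s.toNat := by
        have := hpre.length_le; simp at this; omega
      have hwpos : 0 < w.length := List.length_pos_of_ne_nil (map_key_ne_nil _ hm)
      have he := eTok_of_occ hm hpre
      have hnone := firstHit_desc_none cs.length _ hk hE ((s.toNat : Int) + w.length - 1)
        (by omega) (by omega)
      rw [hnone] at he; cases he
  | some ve_pair =>
    obtain ⟨ve, e⟩ := ve_pair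
    obtain ⟨he0, hea, hete, hemax⟩ := firstHit_desc_some cs.length _ hk hE
    obtain ⟨we, hme, hwel, hpree⟩ := occ_of_eTok hete he0 (by omega)
    have hwepos : 0 < we.length := List.length_pos_of_ne_nil (map_key_ne_nil _ hme)
    have hwse : wTok cs (((e + 1).toNat - we.length : Nat) : Int) = some ve := wTok_of_occ hme hpree
    cases hW : firstHit (wTok cs) (PySem.List.pyRange ((cs.length : Int) - 1) (-1) (-1)) with
    | none =>
      exfalso
      have := firstHit_desc_none cs.length _ hk hW (((e + 1).toNat - we.length : Nat) : Int)
        (by omega) (by omega)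
      rw [this] at hwse; cases hwse
    | some vs_pair =>
      obtain ⟨vs, s⟩ := vs_pair
      obtain ⟨hs0, hsa, hwts, hwmax⟩ := firstHit_desc_some cs.length _ hk hW
      obtain ⟨ws, hms, hpres⟩ := wTok_eq_some_iff.1 hwts
      have hwsl : ws.length ≤ cs.length - s.toNat := by
        have := hpres.length_le; simp at this; omega
      have hwspos : 0 < ws.length := List.length_pos_of_ne_nil (map_key_ne_nil _ hms)
      have hse_le_s : (((e + 1).toNat - we.length : Nat) : Int) ≤ s := by
        by_contra hcon
        have := hwmax (((e + 1).toNat - we.length : Nat) : Int) (by omega) (by omega)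
        rw [this] at hwse; cases hwse
      have hes_le_e : s + (ws.length : Int) - 1 ≤ e := by
        by_contra hcon
        have hets : eTok cs ((s.toNat : Int) + ws.length - 1) = some vs := eTok_of_occ hms hpres
        have := hemax ((s.toNat : Int) + ws.length - 1) (by omega) (by omega)
        rw [this] at hets; cases hets
      have hinf : ws <:+: we := occ_infix hpres hpree (by omega) (by omega)
      have hpair := map_key_infix _ hms _ hme hinf
      have hw_eq : ws = we := congrArg Prod.fst hpair
      have hv_eq : vs = ve := congrArg Prod.snd hpair
      subst hw_eq
      have hspan_e : e = s + (ws.length : Int) - 1 := by omega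
      -- now compare with the digit hit
      cases hDg : firstHit (gTok cs) (PySem.List.pyRange ((cs.length : Int) - 1) (-1) (-1)) with
      | none =>
        have h1 : (-1 : Int) < e := by omega
        have h2 : (-1 : Int) < s := by omega
        simp [upd4, stOf, h1, h2, hv_eq]
      | some dd =>
        obtain ⟨dv, di⟩ := dd
        obtain ⟨hd0, hda, hgd, -⟩ := firstHit_desc_some cs.length _ hk hDg
        have hdig : PySem.Chars.isdigit (PySem.List.pyGetD cs di ' ') = true := by
          rw [gTok] at hgd
          by_cases hx : PySem.Chars.isdigit (PySem.List.pyGetD cs di ' ') = true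
          · exact hx
          · rw [if_neg hx] at hgd; cases hgd
        have hnotspan : di < s ∨ e < di := by
          by_contra hcon
          rw [not_or] at hcon
          obtain ⟨hc1, hc2⟩ := hcon
          have hlt : di.toNat < cs.length := by omega
          have hnd := not_digit_in_span hms hpres (d := di.toNat) (by omega) (by omega) hlt
          rw [PySem.List.pyGetD_eq_getElem (xs := cs) (d := ' ') (by omega) (by omega)] at hdig
          rw [hdig] at hnd; cases hnd
        rcases hnotspan with hlt | hgt
        · have h1 : di < e := by omega
          simp [upd4, stOf, h1, hlt, hv_eq]
        · have h1 : ¬ di < e := by omega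
          have h2 : ¬ di < s := by omega
          simp [upd4, stOf, h1, h2]

-- ---- B's collecting pass is filterMap of the token function ----
lemma foldl_opt_append {g : Int → Option (List Char)} :
    ∀ (l : List Int) (acc : List (List Char)),
      l.foldl (fun a i => match g i with | some v => a ++ [v] | none => a) acc
        = acc ++ l.filterMap g := by
  intro l
  induction l with
  | nil => intro acc; simp
  | cons j js ih =>
    intro acc
    rw [List.foldl_cons, List.filterMap_cons]
    cases hg : g j with
    | none => rw [ih]
    | some v => rw [ih]; simp

lemma filterMap_head? {g : Int → Option (List Char)} :
    ∀ (l : List Int), (l.filterMap g).head? = (firstHit g l).map (·.1) := by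
  intro l
  induction l with
  | nil => rfl
  | cons j js ih =>
    rw [List.filterMap_cons, firstHit]
    cases hg : g j with
    | none => exact ih
    | some v => rfl

lemma filterMap_getLast? {g : Int → Option (List Char)} (l : List Int) :
    (l.filterMap g).getLast? = (firstHit g l.reverse).map (·.1) := by
  rw [List.getLast?_eq_head?_reverse, ← List.filterMap_reverse, filterMap_head?]

-- ---- per-line equality ----
lemma line_eq (line : String) : pvALine line = pvBLine line := by
  unfold pvALine pvBLine
  set cs : List Char := line.toList with hcs
  simp only [PySem.List.len_eq]
  rw [PySem.List.enumerate_eq_map_pyRange cs ' ']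
  simp only [PySem.List.len_eq]
  rw [pvA1_eq cs.length 0 (by omega) (by omega)]
  rw [pvA2_eq cs.length 0 _ (by omega) (by omega)]
  rw [pvA3_eq cs.length ((cs.length : Int) - 1) (by omega)]
  rw [pvA4_eq cs.length ((cs.length : Int) - 1) _ (by omega) (by omega)]
  rw [first_combine cs.length 0 (by omega) (by omega)]
  rw [last_bridge]
  rw [last_combine cs.length ((cs.length : Int) - 1) (by omega) (by omega)]
  -- B side: the collecting fold is a filterMap
  simp only [List.foldl_map]
  have hfun : (fun (acc : List (List Char)) (j : Int) =>
      if PySem.Chars.isdigit (PySem.List.pyGetD cs j ' ') then acc ++ [[PySem.List.pyGetD cs j ' ']]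
      else match pvBWordAt cs j.toNat with
           | some v => acc ++ [v]
           | none => acc)
      = fun (acc : List (List Char)) (j : Int) =>
          match dTok cs j with | some v => acc ++ [v] | none => acc := by
    funext acc j
    by_cases hdig : PySem.Chars.isdigit (PySem.List.pyGetD cs j ' ') = true
    · rw [if_pos hdig, dTok, if_pos hdig]
    · rw [if_neg hdig, dTok, if_neg hdig]
  rw [hfun, foldl_opt_append, List.nil_append]
  -- first/last of the token list
  rw [← filterMap_head?]
  have hrev : PySem.List.pyRange ((cs.length : Int) - 1) (-1) (-1)
      = (PySem.List.pyRange 0 (cs.length : Int) 1).reverse := by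
    have h := PySem.List.pyRange_neg_one_eq_reverse ((cs.length : Int) - 1) (-1)
    simpa using h
  rw [hrev, ← filterMap_getLast?]
  set digits := (PySem.List.pyRange 0 (cs.length : Int) 1).filterMap (dTok cs) with hdig
  by_cases hD : digits = []
  · rw [hD]; simp
  · obtain ⟨h0, hh0⟩ := Option.isSome_iff_exists.1 (List.isSome_head?.2 hD)
    have hl0 := List.getLast?_eq_some_getLast hD
    rw [hh0, hl0]
    have hempty : digits.isEmpty = false := by simp [hD]
    rw [hempty]
    simp only [Bool.false_eq_true, if_false]
    have hget0 : PySem.List.pyGetD digits 0 [] = h0 := by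
      rw [PySem.List.pyGetD_zero, List.getD_eq_getElem?_getD, ← List.head?_eq_getElem?, hh0]
      rfl
    have hgetl : PySem.List.pyGetD digits (-1) [] = digits.getLast hD :=
      PySem.List.pyGetD_neg_one digits [] hD
    rw [hget0, hgetl]

-- ---- lifting over the file fold ----
lemma foldl_line_eq : ∀ (l : List String) (acc : Int),
    l.foldl (fun a s => a + pvALine s) acc = l.foldl (fun a s => a + pvBLine s) acc := by
  intro l
  induction l with
  | nil => intro acc; rfl
  | cons x xs ih => intro acc; rw [List.foldl_cons, List.foldl_cons, line_eq, ih]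

-- ===== VERDICT (by name: the statement is the Claim_ definition above) =====
theorem calculate_sum_from_lines_spec : Claim_equal_calculate_sum_from_lines := by
  intro file _
  unfold Spec_calculate_sum_from_lines calculate_sum_from_lines calculate_sum_from_lines_alt
  exact foldl_line_eq file 0
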